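-- pv_equiv track=rewrite | github.com/aguumg/Curso-Introduccion-a-la-Computacion-para-Matematicos | Python/TP2/TP2Cheto.py | diferencias_posiciones_unos
-- ===== SOURCE A (Python) =====
-- def lista_posiciones_unos(line):                          #Dada una lista de ceros y unos, devuelve una lista con las posiciones de los unos en la lista de entrada.
--         indice=0
--         lista_unos=[]
--         while(indice<len(line)):
--                 if(line[indice]=='1'):
--                         lista_unos.append(indice)
--                 indice=indice+1
--         return lista_unos
--
-- def diferencias_posiciones_unos(line):                    #Una forma de calcular un corredor es restar las posiciones de los unos que encierran los corredores.
--         indice=0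
--         diferencias=[]
--         lista_unos=lista_posiciones_unos(line)
--         diferencias.append(lista_unos[0])                                               #Agrego la primera posicion de lista_unos, porque esa ya me indica cuantos ceros hay antes que ese uno.
--         diferencias.append(len(line)-1-lista_unos[len(lista_unos)-1])                   #Agrego la diferencia entre el largo de la fila y la ultima posicion de lista_unos.
--         while(indice<len(lista_unos)-1):                                                #Agrego las diferencias de posiciones consecutivas de la lista_unos (salvo el caso de la ultima posicion).
--                 diferencias.append(lista_unos[indice+1]-lista_unos[indice]-1)
--                 indice=indice+1
--         return diferencias
-- ===== SOURCE B (Python) =====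
-- def diferencias_posiciones_unos(line):
--     # Split the line into runs of non-'1' elements; the run lengths are, in order:
--     # leading zeros, interior gaps, trailing zeros. Reassemble in A's order.
--     parts = []
--     cur = 0
--     for x in line:
--         if x == '1':
--             parts.append(cur)
--             cur = 0
--         else:
--             cur += 1
--     parts.append(cur)
--     return [parts[0], parts[-1]] + parts[1:-1]
-- ===== Notes on version B (the rewrite author's own statement) =====
-- stated objective: simpler
-- what changed: A first builds the list of indices of '1' elements and then takes pairwise index differences in a second index loop; B makes a single pass accumulating the lengths of the runs of non-'1' elements directly and reorders them as [first, last] + middle, never materialising positions.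
import Mathlib
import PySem

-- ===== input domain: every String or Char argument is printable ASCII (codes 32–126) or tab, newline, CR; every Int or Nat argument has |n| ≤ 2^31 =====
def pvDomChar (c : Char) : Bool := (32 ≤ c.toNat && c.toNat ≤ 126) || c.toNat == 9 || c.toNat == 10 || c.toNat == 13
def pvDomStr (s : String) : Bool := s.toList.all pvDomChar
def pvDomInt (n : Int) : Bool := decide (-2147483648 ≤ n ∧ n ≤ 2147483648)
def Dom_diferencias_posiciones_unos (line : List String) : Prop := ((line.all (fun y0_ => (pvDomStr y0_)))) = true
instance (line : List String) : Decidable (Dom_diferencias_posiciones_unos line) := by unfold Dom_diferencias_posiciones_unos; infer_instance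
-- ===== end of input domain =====

-- B replaces A's two phases (collect the indices of the '1's, then loop again taking index
-- differences) by a single pass that accumulates the lengths of the runs of non-'1' elements
-- directly (objective: simpler).

-- ===== PORT A =====
-- while(indice<len(line)): if line[indice]=='1': lista_unos.append(indice); indice+=1
-- line.getD indice "" is exact here: the loop guard keeps indice in range.
def lpuLoop (line : List String) (indice : Nat) (lista_unos : List Int) : List Int :=
  if _ : indice < line.length then
    lpuLoop line (indice + 1)
      (if line.getD indice "" == "1" then lista_unos ++ [(indice : Int)] else lista_unos)
  else lista_unos
termination_by line.length - indice

def lista_posiciones_unos (line : List String) : List Int := lpuLoop line 0 []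

-- while(indice<len(lista_unos)-1): diferencias.append(u[indice+1]-u[indice]-1); indice+=1
-- getD _ 0 is exact here: both indices are in range while the guard holds.
def gapsLoop (lista_unos : List Int) (indice : Nat) (diferencias : List Int) : List Int :=
  if _ : indice < lista_unos.length - 1 then
    gapsLoop lista_unos (indice + 1)
      (diferencias ++ [lista_unos.getD (indice + 1) 0 - lista_unos.getD indice 0 - 1])
  else diferencias
termination_by lista_unos.length - 1 - indice

def diferencias_posiciones_unos (line : List String) : List Int :=
  let lista_unos := lista_posiciones_unos line
  -- lista_unos[0] and lista_unos[len-1] raise IndexError when lista_unos is empty;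
  -- those inputs are excluded by Pre_, so getD's default is never the value used.
  let diferencias : List Int :=
    [lista_unos.getD 0 0,
     (line.length : Int) - 1 - lista_unos.getD (lista_unos.length - 1) 0]
  gapsLoop lista_unos 0 diferencias

-- ===== PORT B =====
def diferencias_posiciones_unos_alt (line : List String) : List Int :=
  let s := line.foldl
    (fun (s : List Int × Int) x => if x == "1" then (s.1 ++ [s.2], 0) else (s.1, s.2 + 1))
    ([], 0)
  let parts := s.1 ++ [s.2]
  [parts.headD 0, parts.getLastD 0] ++ parts.tail.dropLast

-- ===== PRECONDITION & SPEC =====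
-- Pre_ excludes exactly the inputs with no '1' element, on which Python A raises IndexError.
def Pre_diferencias_posiciones_unos (line : List String) : Prop := "1" ∈ line
instance (line : List String) : Decidable (Pre_diferencias_posiciones_unos line) := by
  unfold Pre_diferencias_posiciones_unos; infer_instance

def pvWitness_diferencias_posiciones_unos : List String := ["0", "1", "0", "1"]

def Spec_diferencias_posiciones_unos (line : List String) (out : List Int) : Prop :=
  out = diferencias_posiciones_unos_alt line
instance (line : List String) (out : List Int) :
    Decidable (Spec_diferencias_posiciones_unos line out) := by
  unfold Spec_diferencias_posiciones_unos; infer_instance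

-- ===== CLAIM (what is proved, stated in full; the proofs are below) =====
def Claim_equal_diferencias_posiciones_unos : Prop :=
  ∀ (line : List String), Dom_diferencias_posiciones_unos line →
    Pre_diferencias_posiciones_unos line →
    Spec_diferencias_posiciones_unos line (diferencias_posiciones_unos line)

-- ===== LEMMAS AND PROOFS =====

-- positions of the '1' elements of xs, counting from offset k
def posOnes (xs : List String) (k : Int) : List Int :=
  match xs with
  | [] => []
  | x :: xs => if x == "1" then k :: posOnes xs (k + 1) else posOnes xs (k + 1)

def gapsOf (u : List Int) : List Int := List.zipWith (fun a b => b - a - 1) u u.tail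

def partsOf (c : Int) (u : List Int) (k : Int) : List Int :=
  match u with
  | [] => []
  | p0 :: _ => (c + (p0 - k)) :: gapsOf u

def curOf (c k n : Int) (u : List Int) : Int :=
  match u with
  | [] => c + n
  | _ :: _ => k + n - 1 - u.getLastD 0

theorem lpu_spec : ∀ (n : Nat) (l : List String) (i : Nat) (acc : List Int),
    l.length - i = n →
    lpuLoop l i acc = acc ++ (posOnes (l.drop i) (i : Int)) := by
  intro n
  induction n with
  | zero =>
    intro l i acc h
    have hge : l.length ≤ i := by omega
    rw [lpuLoop]
    simp [Nat.not_lt.mpr hge, List.drop_eq_nil_of_le hge, posOnes]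
  | succ m ih =>
    intro l i acc h
    have hlt : i < l.length := by omega
    have hdrop : l.drop i = l[i]'hlt :: l.drop (i + 1) :=
      List.drop_eq_getElem_cons hlt
    rw [lpuLoop]
    simp only [hlt, dif_pos, List.getD_eq_getElem?_getD, List.getElem?_eq_getElem hlt,
      Option.getD_some]
    rw [ih l (i + 1) _ (by omega), hdrop]
    by_cases h1 : l[i] == "1"
    · simp [posOnes, h1]
    · simp [posOnes, h1]

theorem fold_spec (xs : List String) : ∀ (ps : List Int) (c : Int) (k : Int),
    xs.foldl
      (fun (s : List Int × Int) x => if x == "1" then (s.1 ++ [s.2], 0) else (s.1, s.2 + 1))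
      (ps, c)
    = (ps ++ partsOf c (posOnes xs k) k, curOf c k (xs.length : Int) (posOnes xs k)) := by
  induction xs with
  | nil => intro ps c k; simp [posOnes, partsOf, curOf]
  | cons x xs ih =>
    intro ps c k
    by_cases h1 : x == "1"
    · simp only [List.foldl_cons, h1, if_pos, posOnes]
      rw [ih (ps ++ [c]) 0 (k + 1)]
      rcases hu : posOnes xs (k + 1) with _ | ⟨q, t⟩
      · simp [partsOf, curOf, gapsOf]
        ring
      · simp [partsOf, curOf, gapsOf]
        constructor <;> ring
    · simp only [List.foldl_cons, h1, posOnes, Bool.false_eq_true, if_false]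
      rw [ih ps (c + 1) (k + 1)]
      rcases hu : posOnes xs (k + 1) with _ | ⟨q, t⟩
      · simp [partsOf, curOf]
        ring
      · simp [partsOf, curOf]
        constructor
        · ring
        · ring

theorem gapsLoop_spec : ∀ (n : Nat) (u : List Int) (i : Nat) (acc : List Int),
    u.length - 1 - i = n →
    gapsLoop u i acc = acc ++ gapsOf (u.drop i) := by
  intro n
  induction n with
  | zero =>
    intro u i acc h
    have hge : ¬ i < u.length - 1 := by omega
    rw [gapsLoop]
    simp only [hge, dif_neg, not_false_iff]
    rcases hd : u.drop i with _ | ⟨a, t⟩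
    · simp [gapsOf]
    · have hl := congrArg List.length hd
      simp only [List.length_drop, List.length_cons] at hl
      have ht : t = [] := List.eq_nil_of_length_eq_zero (by omega)
      subst ht
      simp [gapsOf]
  | succ m ih =>
    intro u i acc h
    have hlt : i < u.length - 1 := by omega
    have h1 : i < u.length := by omega
    have h2 : i + 1 < u.length := by omega
    rw [gapsLoop]
    simp only [hlt, dif_pos]
    rw [ih u (i + 1) _ (by omega)]
    have d1 : u.drop i = u[i]'h1 :: u.drop (i + 1) := List.drop_eq_getElem_cons h1
    have d2 : u.drop (i + 1) = u[i + 1]'h2 :: u.drop (i + 2) := List.drop_eq_getElem_cons h2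
    have e1 : gapsOf (u.drop i) = (u[i + 1]'h2 - u[i]'h1 - 1) :: gapsOf (u.drop (i + 1)) := by
      unfold gapsOf
      rw [d1, d2]
      simp only [List.tail_cons, List.zipWith_cons_cons]
    rw [e1]
    simp [List.getD_eq_getElem?_getD, List.getElem?_eq_getElem h1, List.getElem?_eq_getElem h2]

theorem posOnes_ne_nil (xs : List String) (k : Int) (h : "1" ∈ xs) : posOnes xs k ≠ [] := by
  induction xs generalizing k with
  | nil => simp at h
  | cons x xs ih =>
    by_cases h1 : x == "1"
    · simp [posOnes, h1]
    · have hx : x ≠ "1" := by simpa using h1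
      have hm : "1" ∈ xs := by
        rcases List.mem_cons.mp h with h2 | h2
        · exact absurd h2.symm hx
        · exact h2
      simp only [posOnes, h1, Bool.false_eq_true, if_false]
      exact ih (k + 1) hm

theorem getD_last (u : List Int) (h : u ≠ []) : u.getD (u.length - 1) 0 = u.getLastD 0 := by
  have hlt : u.length - 1 < u.length := by
    have := List.length_pos_of_ne_nil h
    omega
  simp [List.getD_eq_getElem?_getD, List.getElem?_eq_getElem hlt,
    List.getLastD_eq_getLast?, List.getLast?_eq_getElem?]

-- ===== VERDICT (by name: the statement is the Claim_ definition above) =====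
theorem diferencias_posiciones_unos_spec : Claim_equal_diferencias_posiciones_unos := by
  unfold Claim_equal_diferencias_posiciones_unos
  intro l hdom hpre
  unfold Spec_diferencias_posiciones_unos diferencias_posiciones_unos
  unfold diferencias_posiciones_unos_alt lista_posiciones_unos
  rw [lpu_spec l.length l 0 [] (by simp), fold_spec l [] 0 0]
  simp only [List.drop_zero, List.nil_append, Nat.cast_zero]
  have hne : posOnes l 0 ≠ [] := posOnes_ne_nil l 0 hpre
  obtain ⟨p0, t, hu⟩ := List.exists_cons_of_ne_nil hne
  rw [gapsLoop_spec ((posOnes l 0).length - 1) (posOnes l 0) 0 _ rfl]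
  rw [hu, getD_last (p0 :: t) (by simp)]
  simp [partsOf, curOf]
  rw [← List.cons_append, List.getLast?_concat]
  simp
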